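-- pv_equiv track=rewrite | github.com/glandon22/AutoOldSchool | osrs/util.py | monster_perimeter_coordinates
-- ===== SOURCE A (Python) =====
-- def monster_perimeter_coordinates(size, sw_tile, z=0):
--     #coordinates = []
--     coordinates = {}
--     x_start = sw_tile['x_coord'] - 1
--     y_start = sw_tile['y_coord'] - 1
--     # Bottom edge (excluding corners)
--     for x in range(x_start + 1, x_start + size - 1):
--         #coordinates.append({'x': x, 'y': y_start, 'z': z})
--         coordinates[f"{x},{y_start},{z}"] = True
--
--     # Right edge (excluding corners)
--     for y in range(y_start + 1, y_start + size - 1):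
--         #coordinates.append({'x': x_start + size - 1, 'y': y, 'z': z})
--         coordinates[f"{x_start + size - 1},{y},{z}"] = True
--
--     # Top edge (excluding corners)
--     for x in range(x_start + size - 2, x_start, -1):
--         #coordinates.append({'x': x, 'y': y_start + size - 1, 'z': z})
--         coordinates[f"{x},{y_start + size - 1},{z}"] = True
--     # Left edge (excluding corners)
--     for y in range(y_start + size - 2, y_start, -1):
--         #coordinates.append({'x': x_start, 'y': y, 'z': z})
--         coordinates[f"{x_start},{y},{z}"] = True
--
--     return coordinates
-- ===== SOURCE B (Python) =====
-- def monster_perimeter_coordinates(size, sw_tile, z=0):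
--     # Rotation-symmetry approach: compute only the bottom edge, then obtain the
--     # right, top and left edges as successive 90-degree counterclockwise rotations
--     # of it about the square's centre (an integer map since the half-coordinates cancel).
--     x0 = sw_tile['x_coord'] - 1
--     y0 = sw_tile['y_coord'] - 1
--     s = x0 + y0 + size - 1          # = cx + cy (integer, centre may be half-integer)
--     d = y0 - x0                     # = cy - cx
--
--     def rot(p):                     # 90-degree CCW rotation about the centre
--         x, y = p
--         return (s - y, d + x)
--
--     edge = [(x0 + i, y0) for i in range(1, size - 1)]
--     pts = []
--     for _ in range(4):
--         pts += edge
--         edge = [rot(p) for p in edge]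
--     return {f"{x},{y},{z}": True for (x, y) in pts}
-- ===== Notes on version B (the rewrite author's own statement) =====
-- stated objective: alternative
-- what changed: B computes only the bottom edge of the perimeter and derives the right, top and left edges by applying a 90-degree rotation about the square's centre three times (an integer map), instead of A's four hand-written edge loops with separate coordinate arithmetic.
import Mathlib
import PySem

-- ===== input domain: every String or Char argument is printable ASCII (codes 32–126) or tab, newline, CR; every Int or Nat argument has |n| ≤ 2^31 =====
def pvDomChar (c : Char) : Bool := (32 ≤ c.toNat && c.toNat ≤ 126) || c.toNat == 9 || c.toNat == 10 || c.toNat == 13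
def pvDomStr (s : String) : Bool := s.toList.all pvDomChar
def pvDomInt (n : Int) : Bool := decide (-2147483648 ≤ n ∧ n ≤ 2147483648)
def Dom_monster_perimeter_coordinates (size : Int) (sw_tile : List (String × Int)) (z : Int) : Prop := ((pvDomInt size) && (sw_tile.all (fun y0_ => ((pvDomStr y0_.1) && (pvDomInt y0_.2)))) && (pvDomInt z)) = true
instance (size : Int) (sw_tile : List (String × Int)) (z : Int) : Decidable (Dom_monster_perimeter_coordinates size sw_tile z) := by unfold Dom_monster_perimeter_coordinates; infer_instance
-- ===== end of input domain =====

-- B computes only the bottom edge and derives the other three edges by applying a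
-- 90° rotation about the square's centre three times; objective: alternative algorithm.

-- ===== PORT A =====
-- f"{x},{y},{z}"
def pvKey (x y z : Int) : String :=
  PySem.Int.toStr x ++ "," ++ PySem.Int.toStr y ++ "," ++ PySem.Int.toStr z

def monster_perimeter_coordinates (size : Int) (sw_tile : List (String × Int)) (z : Int) : List (String × Bool) :=
  -- sw_tile['x_coord'] / ['y_coord']: Pre_ guarantees the keys are present (else Python raises KeyError)
  let x_start := ((PySem.Dict.mk sw_tile).get? "x_coord").getD 0 - 1
  let y_start := ((PySem.Dict.mk sw_tile).get? "y_coord").getD 0 - 1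
  -- Bottom edge (excluding corners)
  let d1 := (PySem.List.pyRange (x_start + 1) (x_start + size - 1) 1).foldl
      (fun d x => d.insert (pvKey x y_start z) true) PySem.Dict.empty
  -- Right edge (excluding corners)
  let d2 := (PySem.List.pyRange (y_start + 1) (y_start + size - 1) 1).foldl
      (fun d y => d.insert (pvKey (x_start + size - 1) y z) true) d1
  -- Top edge (excluding corners)
  let d3 := (PySem.List.pyRange (x_start + size - 2) x_start (-1)).foldl
      (fun d x => d.insert (pvKey x (y_start + size - 1) z) true) d2
  -- Left edge (excluding corners)
  let d4 := (PySem.List.pyRange (y_start + size - 2) y_start (-1)).foldl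
      (fun d y => d.insert (pvKey x_start y z) true) d3
  d4.items

-- ===== PORT B =====
def monster_perimeter_coordinates_alt (size : Int) (sw_tile : List (String × Int)) (z : Int) : List (String × Bool) :=
  let x0 := ((PySem.Dict.mk sw_tile).get? "x_coord").getD 0 - 1
  let y0 := ((PySem.Dict.mk sw_tile).get? "y_coord").getD 0 - 1
  let s := x0 + y0 + size - 1
  let d := y0 - x0
  -- edge = [(x0 + i, y0) for i in range(1, size - 1)]
  let edge0 : List (Int × Int) := (PySem.List.pyRange 1 (size - 1) 1).map (fun i => (x0 + i, y0))
  -- for _ in range(4): pts += edge; edge = [rot(p) for p in edge]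
  let st := (List.range 4).foldl
      (fun (st : List (Int × Int) × List (Int × Int)) _ =>
        (st.1 ++ st.2, st.2.map (fun p => (s - p.2, d + p.1)))) ([], edge0)
  -- {f"{x},{y},{z}": True for (x, y) in pts}
  (st.1.foldl (fun dd p => dd.insert (pvKey p.1 p.2 z) true) PySem.Dict.empty).items

-- ===== PRECONDITION & SPEC =====
-- Pre_ excludes exactly the inputs where Python A raises KeyError: sw_tile missing 'x_coord' or 'y_coord'.
def Pre_monster_perimeter_coordinates (size : Int) (sw_tile : List (String × Int)) (z : Int) : Prop :=
  ((PySem.Dict.mk sw_tile).get? "x_coord").isSome = true ∧ ((PySem.Dict.mk sw_tile).get? "y_coord").isSome = true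
instance (size : Int) (sw_tile : List (String × Int)) (z : Int) : Decidable (Pre_monster_perimeter_coordinates size sw_tile z) := by unfold Pre_monster_perimeter_coordinates; infer_instance
def pvWitness_monster_perimeter_coordinates : Int × (List (String × Int)) × Int :=
  (4, [("x_coord", 10), ("y_coord", 20)], 0)

def Spec_monster_perimeter_coordinates (size : Int) (sw_tile : List (String × Int)) (z : Int) (out : List (String × Bool)) : Prop := out = monster_perimeter_coordinates_alt size sw_tile z
instance (size : Int) (sw_tile : List (String × Int)) (z : Int) (out : List (String × Bool)) : Decidable (Spec_monster_perimeter_coordinates size sw_tile z out) := by unfold Spec_monster_perimeter_coordinates; infer_instance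

-- ===== CLAIM (what is proved, stated in full; the proofs are below) =====
def Claim_equal_monster_perimeter_coordinates : Prop := ∀ (size : Int) (sw_tile : List (String × Int)) (z : Int), Dom_monster_perimeter_coordinates size sw_tile z → Pre_monster_perimeter_coordinates size sw_tile z → Spec_monster_perimeter_coordinates size sw_tile z (monster_perimeter_coordinates size sw_tile z)

-- ===== LEMMAS AND PROOFS =====

lemma pv_mapext {α : Type} (N : Nat) (f g : Nat → α) (h : ∀ k : Nat, f k = g k) :
    (List.range N).map f = (List.range N).map g :=
  List.map_congr_left (fun k _ => h k)

-- ===== VERDICT (by name: the statement is the Claim_ definition above) =====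
theorem monster_perimeter_coordinates_spec : Claim_equal_monster_perimeter_coordinates := by
  intro size sw_tile z _hdom _hpre
  unfold Spec_monster_perimeter_coordinates
  simp only [monster_perimeter_coordinates, monster_perimeter_coordinates_alt]
  set x0 := ((PySem.Dict.mk sw_tile).get? "x_coord").getD 0 - 1 with hx0
  set y0 := ((PySem.Dict.mk sw_tile).get? "y_coord").getD 0 - 1 with hy0
  set f : PySem.Dict String Bool → Int × Int → PySem.Dict String Bool :=
    fun d p => d.insert (pvKey p.1 p.2 z) true with hf
  set r : Int × Int → Int × Int :=
    fun p => (x0 + y0 + size - 1 - p.2, y0 - x0 + p.1) with hr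
  set e0 : List (Int × Int) := (PySem.List.pyRange 1 (size - 1) 1).map (fun i => (x0 + i, y0)) with he0
  set r1 := PySem.List.pyRange (x0 + 1) (x0 + size - 1) 1 with hr1
  set r2 := PySem.List.pyRange (y0 + 1) (y0 + size - 1) 1 with hr2
  set r3 := PySem.List.pyRange (x0 + size - 2) x0 (-1) with hr3
  set r4 := PySem.List.pyRange (y0 + size - 2) y0 (-1) with hr4
  -- A's four folds as folds of f over mapped lists
  have s1 : ∀ d0, r1.foldl (fun d x => d.insert (pvKey x y0 z) true) d0
      = (r1.map (fun x => (x, y0))).foldl f d0 := fun d0 =>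
    (List.foldl_map (f := fun x => ((x : Int), y0)) (g := f)).symm
  have s2 : ∀ d0, r2.foldl (fun d y => d.insert (pvKey (x0 + size - 1) y z) true) d0
      = (r2.map (fun y => ((x0 + size - 1 : Int), y))).foldl f d0 := fun d0 =>
    (List.foldl_map (f := fun y => ((x0 + size - 1 : Int), y)) (g := f)).symm
  have s3 : ∀ d0, r3.foldl (fun d x => d.insert (pvKey x (y0 + size - 1) z) true) d0
      = (r3.map (fun x => (x, (y0 + size - 1 : Int)))).foldl f d0 := fun d0 =>
    (List.foldl_map (f := fun x => (x, (y0 + size - 1 : Int))) (g := f)).symm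
  have s4 : ∀ d0, r4.foldl (fun d y => d.insert (pvKey x0 y z) true) d0
      = (r4.map (fun y => ((x0 : Int), y))).foldl f d0 := fun d0 =>
    (List.foldl_map (f := fun y => ((x0 : Int), y)) (g := f)).symm
  -- B's 4-iteration accumulation, unfolded: pts = e0 ++ e0.map r ++ (e0.map r).map r ++ …
  have hB : (List.range 4).foldl
      (fun (st : List (Int × Int) × List (Int × Int)) _ =>
        (st.1 ++ st.2, st.2.map r)) ([], e0)
      = ((([] ++ e0 ++ e0.map r) ++ (e0.map r).map r) ++ ((e0.map r).map r).map r,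
         (((e0.map r).map r).map r).map r) := by
    rfl
  rw [s1, s2, s3, s4, hB]
  simp only [← List.foldl_append, List.nil_append]
  congr 1
  -- canonical List.range forms of the four edges
  set N := (size - 2).toNat with hN
  have b0 : e0 = (List.range N).map (fun k : Nat => ((x0 + 1 + (k : Int), y0) : Int × Int)) := by
    rw [he0, PySem.List.pyRange_one]
    have hlen : (size - 1 - 1).toNat = N := by omega
    rw [hlen, List.map_map]
    exact pv_mapext N _ _ (fun k => by
      simp only [Function.comp_apply, Prod.ext_iff]
      exact ⟨by ring, trivial⟩)
  have b1 : e0.map r = (List.range N).map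
      (fun k : Nat => ((x0 + size - 1, y0 + 1 + (k : Int)) : Int × Int)) := by
    rw [b0, List.map_map]
    exact pv_mapext N _ _ (fun k => by
      simp only [Function.comp_apply, hr, Prod.ext_iff]; omega)
  have b2 : (e0.map r).map r = (List.range N).map
      (fun k : Nat => ((x0 + size - 2 - (k : Int), y0 + size - 1) : Int × Int)) := by
    rw [b1, List.map_map]
    exact pv_mapext N _ _ (fun k => by
      simp only [Function.comp_apply, hr, Prod.ext_iff]; omega)
  have b3 : ((e0.map r).map r).map r = (List.range N).map
      (fun k : Nat => ((x0, y0 + size - 2 - (k : Int)) : Int × Int)) := by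
    rw [b2, List.map_map]
    exact pv_mapext N _ _ (fun k => by
      simp only [Function.comp_apply, hr, Prod.ext_iff]; omega)
  have a0 : r1.map (fun x => ((x : Int), y0)) = (List.range N).map
      (fun k : Nat => ((x0 + 1 + (k : Int), y0) : Int × Int)) := by
    rw [hr1, PySem.List.pyRange_one]
    have hlen : (x0 + size - 1 - (x0 + 1)).toNat = N := by omega
    rw [hlen, List.map_map]
    exact pv_mapext N _ _ (fun k => by
      simp only [Function.comp_apply])
  have a1 : r2.map (fun y => ((x0 + size - 1 : Int), y)) = (List.range N).map
      (fun k : Nat => ((x0 + size - 1, y0 + 1 + (k : Int)) : Int × Int)) := by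
    rw [hr2, PySem.List.pyRange_one]
    have hlen : (y0 + size - 1 - (y0 + 1)).toNat = N := by omega
    rw [hlen, List.map_map]
    exact pv_mapext N _ _ (fun k => by
      simp only [Function.comp_apply])
  have a2 : r3.map (fun x => ((x : Int), (y0 + size - 1 : Int))) = (List.range N).map
      (fun k : Nat => ((x0 + size - 2 - (k : Int), y0 + size - 1) : Int × Int)) := by
    rw [hr3, PySem.List.pyRange_neg_one]
    have hlen : (x0 + size - 2 - x0).toNat = N := by omega
    rw [hlen, List.map_map]
    exact pv_mapext N _ _ (fun k => by
      simp only [Function.comp_apply])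
  have a3 : r4.map (fun y => ((x0 : Int), y)) = (List.range N).map
      (fun k : Nat => ((x0, y0 + size - 2 - (k : Int)) : Int × Int)) := by
    rw [hr4, PySem.List.pyRange_neg_one]
    have hlen : (y0 + size - 2 - y0).toNat = N := by omega
    rw [hlen, List.map_map]
    exact pv_mapext N _ _ (fun k => by
      simp only [Function.comp_apply])
  rw [a0, a1, a2, a3, b3, b2, b1, b0]
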